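-- pv_equiv track=rewrite | github.com/orbweaver-dev/frothiq-control-center | frothiq_control_center/api/routes_wireguard.py | _build_conf
-- ===== SOURCE A (Python) =====
-- def _build_conf(interface: dict, peers: list[dict]) -> str:
--     """Serialise structured data back to WireGuard .conf format."""
--     lines = ["[Interface]"]
--     key_order = ["Address", "ListenPort", "PrivateKey", "DNS", "MTU",
--                  "Table", "PreUp", "PostUp", "PreDown", "PostDown"]
--     written = set()
--     for k in key_order:
--         if interface.get(k):
--             lines.append(f"{k} = {interface[k]}")
--             written.add(k)
--     for k, v in interface.items():
--         if k not in written and v: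
--             lines.append(f"{k} = {v}")
--
--     for peer in peers:
--         lines.append("")
--         if peer.get("name"):
--             lines.append(f"# Name: {peer['name']}")
--         lines.append("[Peer]")
--         peer_order = ["PublicKey", "PresharedKey", "AllowedIPs", "Endpoint", "PersistentKeepalive"]
--         written_p: set[str] = set()
--         for k in peer_order:
--             if peer.get(k):
--                 lines.append(f"{k} = {peer[k]}")
--                 written_p.add(k)
--         for k, v in peer.items():
--             if k not in written_p and k != "name" and v:
--                 lines.append(f"{k} = {v}")
--
--     return "\n".join(lines) + "\n"
-- ===== SOURCE B (Python) =====
-- def _build_conf(interface: dict, peers: list[dict]) -> str: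
--     """Serialise structured data back to WireGuard .conf format."""
--     def body(data, order, exclude=()):
--         tagged = [(order.index(k) if k in order else len(order) + j, k, v)
--                   for j, (k, v) in enumerate(data.items())
--                   if v and k not in exclude]
--         tagged.sort(key=lambda t: t[0])
--         return [f"{k} = {v}" for _, k, v in tagged]
--
--     lines = ["[Interface]"]
--     lines += body(interface, ["Address", "ListenPort", "PrivateKey", "DNS", "MTU",
--                               "Table", "PreUp", "PostUp", "PreDown", "PostDown"])
--     for peer in peers:
--         lines.append("")
--         if peer.get("name"):
--             lines.append(f"# Name: {peer['name']}")
--         lines.append("[Peer]")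
--         lines += body(peer, ["PublicKey", "PresharedKey", "AllowedIPs",
--                              "Endpoint", "PersistentKeepalive"], ("name",))
--     return "\n".join(lines) + "\n"
-- ===== Notes on version B (the rewrite author's own statement) =====
-- stated objective: alternative
-- what changed: A makes two guarded scans per section (the priority list, then the dict's leftovers) maintaining a 'written' set; B instead tags every kept key/value once with an integer rank (its index in the priority list, else len(order)+insertion position) and stably sorts the tagged items by rank, so the output order comes from a sort key rather than from two sequenced scans.
import Mathlib
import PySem

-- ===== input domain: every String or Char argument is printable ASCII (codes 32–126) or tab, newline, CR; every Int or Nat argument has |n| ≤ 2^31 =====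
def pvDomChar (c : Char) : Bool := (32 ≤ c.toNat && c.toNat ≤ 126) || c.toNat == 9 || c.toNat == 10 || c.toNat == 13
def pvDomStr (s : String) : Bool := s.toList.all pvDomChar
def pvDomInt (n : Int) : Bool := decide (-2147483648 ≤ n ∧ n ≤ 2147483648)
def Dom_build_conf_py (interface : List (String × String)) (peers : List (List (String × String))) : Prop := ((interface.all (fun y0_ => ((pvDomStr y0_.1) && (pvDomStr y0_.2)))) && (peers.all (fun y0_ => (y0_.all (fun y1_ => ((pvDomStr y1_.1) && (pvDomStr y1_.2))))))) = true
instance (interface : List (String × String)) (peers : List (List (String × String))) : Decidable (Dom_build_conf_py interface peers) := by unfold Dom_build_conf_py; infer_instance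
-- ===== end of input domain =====

-- B replaces A's two guarded scans per section (priority list, then dict leftovers, with a
-- 'written' set) by a rank-and-sort: every kept key/value is tagged once with an integer rank
-- (index in the priority list, else len(order)+insertion position) and the tagged items are
-- stably sorted by rank before emission. Objective: alternative algorithm, same output.

-- ===== PORT A =====
-- Python truthiness of `interface.get(k)` (None or "" are falsy)
def pvTruthyA (o : Option String) : Bool :=
  match o with
  | some v => v != ""
  | none => false

-- f"{k} = {v}" (shared by both ports)
def pvLine (k v : String) : String := k ++ " = " ++ v

-- body of A's `for k in key_order` loop (identical for the interface and for a peer)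
def pvStepKeyA (d : PySem.Dict String String) (st : List String × PySem.Set String) (k : String) :
    List String × PySem.Set String :=
  if pvTruthyA (d.get? k) then
    (st.1 ++ [pvLine k ((d.get? k).getD "")], PySem.Set.add st.2 k)
  else st

-- body of A's `for peer in peers` loop
def pvPeerLinesA (ls : List String) (peer : List (String × String)) : List String :=
  let pd := PySem.Dict.mk peer
  let ls1 := ls ++ [""]
  let ls2 := if pvTruthyA (pd.get? "name") then ls1 ++ ["# Name: " ++ (pd.get? "name").getD ""] else ls1
  let ls3 := ls2 ++ ["[Peer]"]
  let stp := ["PublicKey", "PresharedKey", "AllowedIPs", "Endpoint", "PersistentKeepalive"].foldl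
      (pvStepKeyA pd) (ls3, (PySem.Set.empty : PySem.Set String))
  peer.foldl
    (fun ls4 p => if !PySem.Set.contains stp.2 p.1 && p.1 != "name" && p.2 != "" then
        ls4 ++ [pvLine p.1 p.2] else ls4)
    stp.1

def build_conf_py (interface : List (String × String)) (peers : List (List (String × String))) : String :=
  let d := PySem.Dict.mk interface
  let st := ["Address", "ListenPort", "PrivateKey", "DNS", "MTU",
             "Table", "PreUp", "PostUp", "PreDown", "PostDown"].foldl
      (pvStepKeyA d) (["[Interface]"], (PySem.Set.empty : PySem.Set String))
  let lines := interface.foldl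
      (fun ls p => if !PySem.Set.contains st.2 p.1 && p.2 != "" then ls ++ [pvLine p.1 p.2] else ls)
      st.1
  let lines2 := peers.foldl pvPeerLinesA lines
  PySem.Str.join "\n" lines2 ++ "\n"

-- ===== PORT B =====
def pvTruthyB (o : Option String) : Bool := o.getD "" != ""

-- rank of a kept item: `order.index(k) if k in order else len(order) + j`
def pvRankB (order : List String) (j : Int) (k : String) : Int :=
  if order.contains k then (((PySem.List.index? order k).getD 0 : Nat) : Int)
  else (order.length : Int) + j

-- B's `body(data, order, exclude)`: tag each kept item with its rank, sort by rank, emit lines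
def pvBodyB (data : List (String × String)) (order exclude : List String) : List String :=
  let tagged := ((PySem.List.enumerate data 0).filter
      (fun q => q.2.2 != "" && !exclude.contains q.2.1)).map
      (fun q => (pvRankB order q.1 q.2.1, q.2.1, q.2.2))
  (PySem.List.sorted tagged (fun t => t.1) false).map (fun t => pvLine t.2.1 t.2.2)

-- body of B's `for peer in peers` loop
def pvPeerLinesB (ls : List String) (peer : List (String × String)) : List String :=
  let pd := PySem.Dict.mk peer
  let ls1 := ls ++ [""]
  let ls2 := if pvTruthyB (pd.get? "name") then ls1 ++ ["# Name: " ++ (pd.get? "name").getD ""] else ls1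
  let ls3 := ls2 ++ ["[Peer]"]
  ls3 ++ pvBodyB peer ["PublicKey", "PresharedKey", "AllowedIPs", "Endpoint", "PersistentKeepalive"] ["name"]

def build_conf_py_alt (interface : List (String × String)) (peers : List (List (String × String))) : String :=
  let lines := ["[Interface]"] ++ pvBodyB interface
      ["Address", "ListenPort", "PrivateKey", "DNS", "MTU",
       "Table", "PreUp", "PostUp", "PreDown", "PostDown"] []
  let lines2 := peers.foldl pvPeerLinesB lines
  PySem.Str.join "\n" lines2 ++ "\n"

-- ===== PRECONDITION & SPEC =====
-- Pre_ only asks that each association list has pairwise-distinct keys: the Python arguments are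
-- dicts, which cannot carry duplicate keys, so this excludes nothing a Python caller can pass.
def Pre_build_conf_py (interface : List (String × String)) (peers : List (List (String × String))) : Prop :=
  (interface.map Prod.fst).Nodup ∧ ∀ p ∈ peers, (p.map Prod.fst).Nodup
instance (interface : List (String × String)) (peers : List (List (String × String))) : Decidable (Pre_build_conf_py interface peers) := by unfold Pre_build_conf_py; infer_instance

def pvWitness_build_conf_py : (List (String × String)) × (List (List (String × String))) :=
  ([("Address", "10.0.0.1/24"), ("Extra", "x")],
   [[("PublicKey", "abc"), ("name", "p1")], [("Endpoint", "")]])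

def Spec_build_conf_py (interface : List (String × String)) (peers : List (List (String × String))) (out : String) : Prop := out = build_conf_py_alt interface peers
instance (interface : List (String × String)) (peers : List (List (String × String))) (out : String) : Decidable (Spec_build_conf_py interface peers out) := by unfold Spec_build_conf_py; infer_instance

-- ===== CLAIM (what is proved, stated in full; the proofs are below) =====
def Claim_equal_build_conf_py : Prop := ∀ (interface : List (String × String)) (peers : List (List (String × String))), Dom_build_conf_py interface peers → Pre_build_conf_py interface peers → Spec_build_conf_py interface peers (build_conf_py interface peers)

-- ===== LEMMAS AND PROOFS =====

theorem pvTruthy_eq (o : Option String) : pvTruthyA o = pvTruthyB o := by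
  cases o <;> rfl

-- A's order loop: the lines it emits
theorem foldl_step_fst (d : PySem.Dict String String) (order : List String)
    (ls : List String) (s : PySem.Set String) :
    (order.foldl (pvStepKeyA d) (ls, s)).1
      = ls ++ (order.filter (fun k => pvTruthyA (d.get? k))).map
          (fun k => pvLine k ((d.get? k).getD "")) := by
  induction order generalizing ls s with
  | nil => simp
  | cons k tl ih =>
    simp only [List.foldl_cons, pvStepKeyA]
    split_ifs with h
    · rw [ih]; simp [h]
    · rw [ih]; simp [h]

-- A's order loop: what its `written` set holds
theorem mem_foldl_step_snd (d : PySem.Dict String String) (order : List String)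
    (ls : List String) (s : PySem.Set String) (x : String) :
    x ∈ (order.foldl (pvStepKeyA d) (ls, s)).2
      ↔ x ∈ s ∨ (x ∈ order ∧ pvTruthyA (d.get? x) = true) := by
  induction order generalizing ls s with
  | nil => simp
  | cons k tl ih =>
    simp only [List.foldl_cons, pvStepKeyA]
    split_ifs with h
    · rw [ih, PySem.Set.mem_add]
      constructor
      · rintro ((hs | hk) | ⟨htl, ht⟩)
        · exact Or.inl hs
        · exact Or.inr ⟨by simp [hk], by rw [hk]; exact h⟩
        · exact Or.inr ⟨List.mem_cons_of_mem _ htl, ht⟩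
      · rintro (hs | ⟨hmem, ht⟩)
        · exact Or.inl (Or.inl hs)
        · rcases List.mem_cons.mp hmem with hk | htl
          · exact Or.inl (Or.inr hk)
          · exact Or.inr ⟨htl, ht⟩
    · rw [ih]
      constructor
      · rintro (hs | ⟨htl, ht⟩)
        · exact Or.inl hs
        · exact Or.inr ⟨List.mem_cons_of_mem _ htl, ht⟩
      · rintro (hs | ⟨hmem, ht⟩)
        · exact Or.inl hs
        · rcases List.mem_cons.mp hmem with hk | htl
          · exact absurd (hk ▸ ht) h
          · exact Or.inr ⟨htl, ht⟩

-- what A's `written` set decides for a key actually present in the dict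
theorem contains_written (data : List (String × String)) (hnd : (data.map Prod.fst).Nodup)
    (order : List String) (ls : List String) (p : String × String) (hp : p ∈ data) :
    PySem.Set.contains
        (order.foldl (pvStepKeyA (PySem.Dict.mk data)) (ls, (PySem.Set.empty : PySem.Set String))).2 p.1
      = (order.contains p.1 && p.2 != "") := by
  have hget : (PySem.Dict.mk data).get? p.1 = some p.2 :=
    PySem.Dict.get?_of_mem_items (PySem.Dict.mk data) hp hnd
  have hmemiff := mem_foldl_step_snd (PySem.Dict.mk data) order ls
      (PySem.Set.empty : PySem.Set String) p.1
  rw [hget] at hmemiff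
  simp only [pvTruthyA] at hmemiff
  have hnil : ¬ p.1 ∈ (PySem.Set.empty : PySem.Set String) := List.not_mem_nil
  simp only [hnil, false_or] at hmemiff
  simp only [PySem.Set.contains, List.contains_eq_mem]
  have hdec : decide (p.1 ∈ (List.foldl (pvStepKeyA (PySem.Dict.mk data))
        (ls, (PySem.Set.empty : PySem.Set String)) order).2)
      = decide (p.1 ∈ order ∧ (p.2 != "") = true) := decide_eq_decide.mpr hmemiff
  rw [hdec]
  by_cases ho : p.1 ∈ order <;> by_cases h2 : p.2 = "" <;> simp [ho, h2]

-- idxOf? of a member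
theorem idxOf?_of_mem (l : List String) (k : String) (h : k ∈ l) :
    l.idxOf? k = some (l.idxOf k) := by
  induction l with
  | nil => simp at h
  | cons x t ih =>
    by_cases hx : x = k
    · subst hx; simp [List.idxOf?_cons, List.idxOf_cons_self]
    · rcases List.mem_cons.mp h with h1 | h1
      · exact absurd h1.symm hx
      · simp [List.idxOf?_cons, hx, ih h1]

-- a filter/map over `enumerate` through the item only is a filter/map over the list
theorem enum_filter_snd_map {β : Type} (xs : List (String × String)) (s : Int)
    (p : String × String → Bool) (f : String × String → β) :
    ((PySem.List.enumerate xs s).filter (fun q => p q.2)).map (fun q => f q.2)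
      = (xs.filter p).map f := by
  conv_rhs => rw [← PySem.List.map_snd_enumerate xs s]
  rw [List.filter_map, List.map_map]
  rfl

-- a Nodup list is strictly increasing under idxOf (as Int)
theorem pairwise_idxOf (l : List String) (h : l.Nodup) :
    l.Pairwise (fun a b => ((l.idxOf a : Nat) : Int) < ((l.idxOf b : Nat) : Int)) := by
  rw [List.pairwise_iff_getElem]
  intro i j hi hj hij
  rw [List.Nodup.idxOf_getElem h i hi, List.Nodup.idxOf_getElem h j hj]
  exact_mod_cast hij

-- THE KEY LEMMA: B's rank-and-sort section equals "priority keys in order, then leftovers"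
theorem bodyB_eq (data : List (String × String)) (hnd : (data.map Prod.fst).Nodup)
    (order : List String) (hord : order.Nodup) (exclude : List String)
    (hdisj : ∀ k ∈ exclude, k ∉ order) :
    pvBodyB data order exclude
      = (order.filter (fun k => pvTruthyB ((PySem.Dict.mk data).get? k))).map
          (fun k => pvLine k (((PySem.Dict.mk data).get? k).getD ""))
        ++ (data.filter (fun kv => !order.contains kv.1
              && (kv.2 != "" && !exclude.contains kv.1))).map (fun kv => pvLine kv.1 kv.2) := by
  have hS :
      PySem.List.sorted
        (((PySem.List.enumerate data 0).filter
            (fun q => q.2.2 != "" && !exclude.contains q.2.1)).map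
          (fun q => (pvRankB order q.1 q.2.1, q.2.1, q.2.2)))
        (fun t => t.1) false
      = (order.filter (fun k => pvTruthyB ((PySem.Dict.mk data).get? k))).map
          (fun k => (((order.idxOf k : Nat) : Int), k, ((PySem.Dict.mk data).get? k).getD ""))
        ++ ((PySem.List.enumerate data 0).filter
            (fun q => !order.contains q.2.1 && (q.2.2 != "" && !exclude.contains q.2.1))).map
          (fun q => ((order.length : Int) + q.1, q.2.1, q.2.2)) := by
    apply PySem.List.sorted_eq_of_perm_of_pairwise_lt
    · -- the named rearrangement is a permutation of the tagged items
      have hsplit :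
          (((PySem.List.enumerate data 0).filter
              (fun q => q.2.2 != "" && !exclude.contains q.2.1)).filter
            (fun q => order.contains q.2.1)
          ++ ((PySem.List.enumerate data 0).filter
              (fun q => q.2.2 != "" && !exclude.contains q.2.1)).filter
            (fun q => !order.contains q.2.1)).Perm
          ((PySem.List.enumerate data 0).filter
            (fun q => q.2.2 != "" && !exclude.contains q.2.1)) :=
        List.filter_append_perm _ _
      have hmain := (hsplit.map (fun q => (pvRankB order q.1 q.2.1, q.2.1, q.2.2)))
      rw [List.map_append] at hmain
      refine List.Perm.trans (List.Perm.append ?_ ?_) hmain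
      · -- priority half
        rw [List.filter_filter]
        rw [List.map_congr_left (f := fun q : Int × String × String =>
              (pvRankB order q.1 q.2.1, q.2.1, q.2.2))
            (g := fun q : Int × String × String =>
              (((order.idxOf q.2.1 : Nat) : Int), q.2.1,
                ((PySem.Dict.mk data).get? q.2.1).getD "")) ?hcg]
        case hcg =>
          intro q hq
          have hq' := List.mem_filter.mp hq
          have hcont : order.contains q.2.1 = true := by
            have := hq'.2; simp only [Bool.and_eq_true] at this; exact this.1
          have hmemo : q.2.1 ∈ order := by simpa [List.contains_eq_mem] using hcont
          have hqe : q.2 ∈ data := by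
            rcases (PySem.List.mem_enumerate_iff data 0 q).mp hq'.1 with ⟨kk, hkk, hqeq⟩
            rw [hqeq]; exact List.getElem_mem hkk
          have hget : (PySem.Dict.mk data).get? q.2.1 = some q.2.2 :=
            PySem.Dict.get?_of_mem_items (PySem.Dict.mk data) hqe hnd
          simp only [pvRankB, hcont, if_pos, hget, Option.getD_some]
          rw [PySem.List.index?_eq_idxOf?, idxOf?_of_mem order q.2.1 hmemo]
          rfl
        rw [enum_filter_snd_map (p := fun kv : String × String =>
              order.contains kv.1 && (kv.2 != "" && !exclude.contains kv.1))
            (f := fun kv : String × String =>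
              (((order.idxOf kv.1 : Nat) : Int), kv.1,
                ((PySem.Dict.mk data).get? kv.1).getD ""))]
        rw [List.filter_congr (q := fun kv : String × String =>
              order.contains kv.1 && pvTruthyB ((PySem.Dict.mk data).get? kv.1)) ?hfc]
        case hfc =>
          intro kv hkv
          have hget : (PySem.Dict.mk data).get? kv.1 = some kv.2 :=
            PySem.Dict.get?_of_mem_items (PySem.Dict.mk data) hkv hnd
          by_cases hmo : kv.1 ∈ order
          · have hnex : kv.1 ∉ exclude := fun hex => hdisj kv.1 hex hmo
            simp [List.contains_eq_mem, hmo, hnex, pvTruthyB, hget]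
          · simp [List.contains_eq_mem, hmo]
        -- now a permutation of key lists, pushed through the tagging map
        have hkeys :
            ((data.map Prod.fst).filter (fun k =>
                order.contains k && pvTruthyB ((PySem.Dict.mk data).get? k))).Perm
              (order.filter (fun k => pvTruthyB ((PySem.Dict.mk data).get? k))) := by
          apply (List.perm_ext_iff_of_nodup (hnd.filter _) (hord.filter _)).mpr
          intro k
          simp only [List.mem_filter, Bool.and_eq_true, List.contains_eq_mem,
            decide_eq_true_eq]
          constructor
          · rintro ⟨_, hko, htr⟩; exact ⟨hko, htr⟩
          · rintro ⟨hko, htr⟩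
            refine ⟨?_, hko, htr⟩
            by_contra hkd
            have : (PySem.Dict.mk data).get? k = none := by
              apply (PySem.Dict.get?_eq_none_iff_not_mem_keys _ _).mpr
              simpa using hkd
            rw [this] at htr; simp [pvTruthyB] at htr
        have := hkeys.map (fun k =>
            (((order.idxOf k : Nat) : Int), k, ((PySem.Dict.mk data).get? k).getD ""))
        rw [List.filter_map] at this
        rw [List.map_map] at this
        exact this.symm
      · -- leftover half: an equality
        rw [List.filter_filter]
        apply List.Perm.of_eq
        apply (List.map_congr_left ?_).symm
        intro q hq
        have hq' := List.mem_filter.mp hq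
        have hnc : order.contains q.2.1 = false := by
          have := hq'.2; simp only [Bool.and_eq_true, Bool.not_eq_true'] at this
          exact this.1
        have hno : q.2.1 ∉ order := by simpa [List.contains_eq_mem] using hnc
        simp [pvRankB, hno]
    · -- the named rearrangement is strictly increasing in the rank
      rw [List.pairwise_append]
      refine ⟨?_, ?_, ?_⟩
      · rw [List.pairwise_map]
        exact (pairwise_idxOf order hord).filter _
      · rw [List.pairwise_map]
        apply List.Pairwise.filter
        exact (PySem.List.pairwise_lt_enumerate data 0).imp (fun h => by omega)
      · intro x hx y hy
        rcases List.mem_map.mp hx with ⟨k, hkf, hxe⟩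
        rcases List.mem_map.mp hy with ⟨q, hqf, hye⟩
        have hko : k ∈ order := (List.mem_filter.mp hkf).1
        have hidx : order.idxOf k < order.length := List.idxOf_lt_length_of_mem hko
        have hq0 : 0 ≤ q.1 := by
          rcases (PySem.List.mem_enumerate_iff data 0 q).mp (List.mem_filter.mp hqf).1 with
            ⟨kk, hkk, hqeq⟩
          rw [hqeq]; simp
        rw [← hxe, ← hye]
        simp only []
        omega
  unfold pvBodyB
  simp only []
  rw [hS, List.map_append, List.map_map, List.map_map]
  congr 1
  exact enum_filter_snd_map data 0
      (fun kv : String × String => !order.contains kv.1 && (kv.2 != "" && !exclude.contains kv.1))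
      (fun kv : String × String => pvLine kv.1 kv.2)

-- one section: A's two loops over `data` produce `ls ++` B's section body
theorem section_eq (data : List (String × String)) (hnd : (data.map Prod.fst).Nodup)
    (order : List String) (hord : order.Nodup) (excl ls : List String)
    (hdisj : ∀ k ∈ excl, k ∉ order) (pA : String × String → Bool)
    (hA : ∀ p ∈ data, pA p = (!order.contains p.1 && (p.2 != "" && !excl.contains p.1))) :
    (data.foldl (fun ls2 p => if pA p then ls2 ++ [pvLine p.1 p.2] else ls2)
        (order.foldl (pvStepKeyA (PySem.Dict.mk data)) (ls, (PySem.Set.empty : PySem.Set String))).1)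
      = ls ++ pvBodyB data order excl := by
  rw [PySem.List.foldl_append_if pA (fun p => pvLine p.1 p.2) data _]
  rw [foldl_step_fst]
  rw [List.filter_congr hA]
  rw [bodyB_eq data hnd order hord excl hdisj]
  rw [show (fun k => pvTruthyA ((PySem.Dict.mk data).get? k))
        = (fun k => pvTruthyB ((PySem.Dict.mk data).get? k)) from
      funext (fun k => pvTruthy_eq _)]
  simp

-- one peer: A's loop body equals B's loop body
theorem peer_step (peer : List (String × String)) (hnd : (peer.map Prod.fst).Nodup)
    (ls : List String) : pvPeerLinesA ls peer = pvPeerLinesB ls peer := by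
  unfold pvPeerLinesA pvPeerLinesB
  simp only []
  rw [pvTruthy_eq]
  rw [section_eq peer hnd _ (by decide) ["name"] _ (by decide) _ ?_]
  intro p hp
  rw [contains_written peer hnd _ _ p hp]
  by_cases hn : p.1 = "name" <;>
    cases hv : (p.2 != "") <;>
      cases ho : (["PublicKey", "PresharedKey", "AllowedIPs", "Endpoint",
          "PersistentKeepalive"] : List String).contains p.1 <;>
        simp [hn, List.contains_eq_mem]

-- ===== VERDICT (by name: the statement is the Claim_ definition above) =====
theorem build_conf_py_spec : Claim_equal_build_conf_py := by
  intro interface peers _ hpre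
  obtain ⟨hni, hnp⟩ := hpre
  unfold Spec_build_conf_py build_conf_py build_conf_py_alt
  simp only []
  rw [section_eq interface hni
      ["Address", "ListenPort", "PrivateKey", "DNS", "MTU",
       "Table", "PreUp", "PostUp", "PreDown", "PostDown"] (by decide) [] ["[Interface]"]
      (by decide) _ ?_]
  · rw [PySem.List.foldl_congr_mem' peers pvPeerLinesA pvPeerLinesB _
        (fun p hp acc => peer_step p (hnp p hp) acc)]
  · intro p hp
    rw [contains_written interface hni _ _ p hp]
    cases hv : (p.2 != "") <;> cases ho :
        (["Address", "ListenPort", "PrivateKey", "DNS", "MTU",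
          "Table", "PreUp", "PostUp", "PreDown", "PostDown"] : List String).contains p.1 <;>
      simp
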